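-- pv_equiv track=rewrite | github.com/hushrilab/utokyo_pupil_metrics | pupil_labs_connect.py | window_slice
-- ===== SOURCE A (Python) =====
-- def window_slice(times_list, start_t, end_t):
--     i0, j0 = None, None
--     for i in range(len(times_list)):
--         if times_list[i] > start_t:
--             i0 = i; break
--     for k in range(len(times_list)-1, -1, -1):
--         if times_list[k] <= end_t:
--             j0 = k; break
--     if i0 is None or j0 is None or i0 > j0:
--         return None
--     return i0, j0
-- ===== SOURCE B (Python) =====
-- def window_slice(times_list, start_t, end_t):
--     # Single forward pass: first index with t > start_t, last index with t <= end_t.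
--     i0 = j0 = None
--     for idx, t in enumerate(times_list):
--         if i0 is None and t > start_t:
--             i0 = idx
--         if t <= end_t:
--             j0 = idx
--     if i0 is None or j0 is None or i0 > j0:
--         return None
--     return i0, j0
-- ===== Notes on version B (the rewrite author's own statement) =====
-- stated objective: simpler
-- what changed: Replaces A's two separate index-loop scans (a forward break-search and a backward break-search) by one forward enumerate pass that records the first element above start_t and keeps overwriting the last element at or below end_t.
import Mathlib
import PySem

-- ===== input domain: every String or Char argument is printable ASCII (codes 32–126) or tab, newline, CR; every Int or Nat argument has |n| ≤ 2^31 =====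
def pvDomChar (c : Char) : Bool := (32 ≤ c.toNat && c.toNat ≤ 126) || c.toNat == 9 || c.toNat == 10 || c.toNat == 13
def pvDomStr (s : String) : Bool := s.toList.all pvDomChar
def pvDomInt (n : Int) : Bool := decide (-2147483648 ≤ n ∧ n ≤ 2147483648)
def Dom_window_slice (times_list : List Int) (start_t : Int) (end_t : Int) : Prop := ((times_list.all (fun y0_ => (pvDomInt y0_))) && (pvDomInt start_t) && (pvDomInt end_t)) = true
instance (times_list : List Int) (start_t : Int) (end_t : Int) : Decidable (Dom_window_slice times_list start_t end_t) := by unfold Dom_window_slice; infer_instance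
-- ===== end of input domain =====

-- B replaces A's two break-searching scans (one forward, one backward) by a single
-- forward pass carrying both accumulators; objective: simpler (same O(n) cost).

-- ===== PORT A =====
-- first loop: for i in range(len(times_list)): if times_list[i] > start_t: i0 = i; break
def wsFwd (ts : List Int) (start_t : Int) (i : Int) : Option Int :=
  match ts with
  | [] => none
  | t :: rest => if t > start_t then some i else wsFwd rest start_t (i + 1)

-- second loop: for k in range(len(times_list)-1, -1, -1): if times_list[k] <= end_t: j0 = k; break
-- walked as the reversed list with the absolute index k counting down
def wsBwd (rev : List Int) (end_t : Int) (k : Int) : Option Int :=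
  match rev with
  | [] => none
  | t :: rest => if t ≤ end_t then some k else wsBwd rest end_t (k - 1)

def window_slice (times_list : List Int) (start_t : Int) (end_t : Int) : Option (Int × Int) :=
  let i0 := wsFwd times_list start_t 0
  let j0 := wsBwd times_list.reverse end_t ((times_list.length : Int) - 1)
  match i0, j0 with
  | some i, some j => if i > j then none else some (i, j)
  | _, _ => none

-- ===== PORT B =====
-- one forward enumerate pass carrying (i0, j0)
def wsLoop (ts : List Int) (start_t end_t : Int) (idx : Int)
    (i0 j0 : Option Int) : Option Int × Option Int :=
  match ts with
  | [] => (i0, j0)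
  | t :: rest =>
      let i0' := if i0 = none ∧ t > start_t then some idx else i0
      let j0' := if t ≤ end_t then some idx else j0
      wsLoop rest start_t end_t (idx + 1) i0' j0'

def window_slice_alt (times_list : List Int) (start_t : Int) (end_t : Int) : Option (Int × Int) :=
  let r := wsLoop times_list start_t end_t 0 none none
  r.1.bind fun i => r.2.bind fun j => if i > j then none else some (i, j)

-- ===== PRECONDITION & SPEC =====
def Spec_window_slice (times_list : List Int) (start_t : Int) (end_t : Int) (out : Option (Int × Int)) : Prop := out = window_slice_alt times_list start_t end_t
instance (times_list : List Int) (start_t : Int) (end_t : Int) (out : Option (Int × Int)) : Decidable (Spec_window_slice times_list start_t end_t out) := by unfold Spec_window_slice; infer_instance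

-- ===== CLAIM (what is proved, stated in full; the proofs are below) =====
def Claim_equal_window_slice : Prop := ∀ (times_list : List Int) (start_t : Int) (end_t : Int), Dom_window_slice times_list start_t end_t → Spec_window_slice times_list start_t end_t (window_slice times_list start_t end_t)

-- ===== LEMMAS AND PROOFS =====

-- forward "last match wins" scan, the second component of B's loop
def lastLe (ts : List Int) (end_t : Int) (idx : Int) (j0 : Option Int) : Option Int :=
  match ts with
  | [] => j0
  | t :: rest => lastLe rest end_t (idx + 1) (if t ≤ end_t then some idx else j0)

lemma wsLoop_eq (ts : List Int) (s e idx : Int) (i0 j0 : Option Int) :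
    wsLoop ts s e idx i0 j0 =
      ((match i0 with | some i => some i | none => wsFwd ts s idx),
        lastLe ts e idx j0) := by
  induction ts generalizing idx i0 j0 with
  | nil => cases i0 <;> simp [wsLoop, wsFwd, lastLe]
  | cons t rest ih =>
      cases i0 with
      | none =>
          by_cases h : t > s <;> simp [wsLoop, wsFwd, lastLe, h, ih]
      | some i =>
          simp [wsLoop, lastLe, ih]

lemma lastLe_append (ts : List Int) (t e idx : Int) (j0 : Option Int) :
    lastLe (ts ++ [t]) e idx j0 =
      if t ≤ e then some (idx + ts.length) else lastLe ts e idx j0 := by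
  induction ts generalizing idx j0 with
  | nil => simp [lastLe]
  | cons a rest ih =>
      simp only [List.cons_append, lastLe, ih]
      split <;> simp [List.length_cons] <;> ring_nf

lemma lastLe_eq_wsBwd (ts : List Int) (e idx : Int) (j0 : Option Int) :
    lastLe ts e idx j0 =
      match wsBwd ts.reverse e (idx + (ts.length : Int) - 1) with
      | some k => some k
      | none => j0 := by
  induction ts using List.reverseRecOn generalizing j0 with
  | nil => simp [lastLe, wsBwd]
  | append_singleton rest t ih =>
      rw [lastLe_append]
      simp only [List.reverse_append, List.reverse_singleton, List.singleton_append,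
        wsBwd, List.length_append, List.length_singleton]
      by_cases h : t ≤ e
      · simp [h]; ring
      · simp [h, ih]
        congr 1
        ring

theorem window_slice_spec : Claim_equal_window_slice := by
  intro ts s e _
  unfold Spec_window_slice window_slice window_slice_alt
  rw [wsLoop_eq, lastLe_eq_wsBwd]
  simp only [zero_add]
  cases wsFwd ts s 0 <;> cases wsBwd ts.reverse e ((ts.length : Int) - 1) <;> simp
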